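-- pv_equiv track=rewrite | github.com/cznewt/monitoring-utils | monitoring_utils/parsers/utils.py | split_by_keyword
-- ===== SOURCE A (Python) =====
-- def split_by_keyword(query, split_keywords, level=0):
--     if level < len(split_keywords):
--         new_query = []
--         for item in query:
--             new_query = new_query + item.split(split_keywords[level])
--         return split_by_keyword(new_query, split_keywords, level + 1)
--
--     else:
--         return query
-- ===== SOURCE B (Python) =====
-- def split_by_keyword(query, split_keywords, level=0):
--     current = query
--     for kw in split_keywords[level:]:
--         current = [piece for item in current for piece in item.split(kw)]
--     return current
-- ===== Notes on version B (the rewrite author's own statement) =====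
-- stated objective: idiomatic
-- what changed: Replaces the recursion on the keyword index with a single loop over split_keywords[level:], rebuilding the list with a flattening comprehension instead of repeated list concatenation in an inner accumulator loop.
-- outside the precondition, e.g. on split_by_keyword(['xaby'], ['a', 'b'], -1): A returns ['x', '', 'y'], B returns ['xa', 'y']
import Mathlib
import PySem

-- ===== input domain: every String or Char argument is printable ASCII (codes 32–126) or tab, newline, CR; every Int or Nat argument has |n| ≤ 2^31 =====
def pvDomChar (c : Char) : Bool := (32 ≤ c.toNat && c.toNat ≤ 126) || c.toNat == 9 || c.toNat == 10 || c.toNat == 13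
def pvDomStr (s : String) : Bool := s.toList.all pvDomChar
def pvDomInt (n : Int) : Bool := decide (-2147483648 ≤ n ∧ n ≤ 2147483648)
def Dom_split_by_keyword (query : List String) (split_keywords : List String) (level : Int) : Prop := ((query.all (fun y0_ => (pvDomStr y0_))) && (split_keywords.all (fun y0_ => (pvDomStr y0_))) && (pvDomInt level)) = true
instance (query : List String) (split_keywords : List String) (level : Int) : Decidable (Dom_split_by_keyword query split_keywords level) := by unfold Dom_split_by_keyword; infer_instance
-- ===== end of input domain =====

-- B replaces A's recursion over the keyword index with one loop over split_keywords[level:] (idiomatic, not faster).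

-- ===== PORT A =====
-- literal transliteration of A's recursion; item.split(kw) → PySem.Str.split? (none = ValueError for kw = "",
-- excluded by Pre_), split_keywords[level] → PySem.List.pyGet? (none = IndexError, excluded by Pre_)
def split_by_keyword (query : List String) (split_keywords : List String) (level : Int) : List String :=
  if h : level < (split_keywords.length : Int) then
    let kw := (PySem.List.pyGet? split_keywords level).getD ""
    let new_query := query.foldl (fun acc item => acc ++ (PySem.Str.split? item kw).getD []) []
    split_by_keyword new_query split_keywords (level + 1)
  else
    query
termination_by ((split_keywords.length : Int) - level).toNat
decreasing_by omega

-- ===== PORT B =====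
def split_by_keyword_alt (query : List String) (split_keywords : List String) (level : Int) : List String :=
  (PySem.List.slice split_keywords (some level) none).foldl
    (fun current kw => current.flatMap (fun item => (PySem.Str.split? item kw).getD [])) query

-- ===== PRECONDITION & SPEC =====
-- Pre_ excludes: (a) negative level — outside the natural domain of this internal recursion counter
-- (A applies Python negative-index wraparound there and then continues from index 0, an artefact;
-- for level < -len A raises IndexError); (b) inputs where A would actually call split("") on a
-- nonempty query, on which Python A raises ValueError.
def Pre_split_by_keyword (query : List String) (split_keywords : List String) (level : Int) : Prop :=
  0 ≤ level ∧ (query = [] ∨ "" ∉ split_keywords.drop level.toNat)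
instance (query : List String) (split_keywords : List String) (level : Int) : Decidable (Pre_split_by_keyword query split_keywords level) := by unfold Pre_split_by_keyword; infer_instance

def pvWitness_split_by_keyword : List String × List String × Int := (["a,b c"], [",", " "], 0)

def Spec_split_by_keyword (query : List String) (split_keywords : List String) (level : Int) (out : List String) : Prop := out = split_by_keyword_alt query split_keywords level
instance (query : List String) (split_keywords : List String) (level : Int) (out : List String) : Decidable (Spec_split_by_keyword query split_keywords level out) := by unfold Spec_split_by_keyword; infer_instance

-- ===== CLAIM (what is proved, stated in full; the proofs are below) =====
def Claim_equal_split_by_keyword : Prop := ∀ (query : List String) (split_keywords : List String) (level : Int), Dom_split_by_keyword query split_keywords level → Pre_split_by_keyword query split_keywords level → Spec_split_by_keyword query split_keywords level (split_by_keyword query split_keywords level)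

-- ===== LEMMAS AND PROOFS =====

-- A's inner accumulator loop builds exactly the flatMap B computes in one comprehension.
theorem inner_eq_flatMap (query : List String) (kw : String) :
    query.foldl (fun acc item => acc ++ (PySem.Str.split? item kw).getD []) [] =
      query.flatMap (fun item => (PySem.Str.split? item kw).getD []) := by
  simpa using PySem.List.foldl_append_eq_flatMap (fun item => (PySem.Str.split? item kw).getD []) query []

theorem key_eq (n : Nat) : ∀ (query split_keywords : List String) (level : Int),
    0 ≤ level → (split_keywords.length : Int) - level ≤ n →
    split_by_keyword query split_keywords level = split_by_keyword_alt query split_keywords level := by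
  induction n with
  | zero =>
    intro q kws level h0 hn
    rw [split_by_keyword]
    rw [dif_neg (by omega)]
    unfold split_by_keyword_alt
    rw [PySem.List.slice_from _ h0, List.drop_eq_nil_of_le (by omega)]
    rfl
  | succ m ih =>
    intro q kws level h0 hn
    rw [split_by_keyword]
    by_cases h : level < (kws.length : Int)
    · rw [dif_pos h]
      have hlt : level.toNat < kws.length := by omega
      have hdrop : kws.drop level.toNat = kws[level.toNat] :: kws.drop (level.toNat + 1) :=
        List.drop_eq_getElem_cons hlt
      have hget : (PySem.List.pyGet? kws level).getD "" = kws[level.toNat] := by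
        rw [PySem.List.pyGet?_of_nonneg _ h0, List.getElem?_eq_getElem hlt]
        rfl
      rw [ih _ _ _ (by omega) (by omega)]
      unfold split_by_keyword_alt
      rw [PySem.List.slice_from _ h0, PySem.List.slice_from _ (by omega), hdrop]
      have hnat : (level + 1).toNat = level.toNat + 1 := by omega
      rw [hnat, List.foldl_cons, hget, inner_eq_flatMap]
    · rw [dif_neg h]
      unfold split_by_keyword_alt
      rw [PySem.List.slice_from _ h0, List.drop_eq_nil_of_le (by omega)]
      rfl

-- ===== VERDICT (by name: the statement is the Claim_ definition above) =====
theorem split_by_keyword_spec : Claim_equal_split_by_keyword := by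
  intro query split_keywords level _ hpre
  obtain ⟨h0, -⟩ := hpre
  exact key_eq (split_keywords.length - level.toNat) query split_keywords level h0 (by omega)
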